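-- pv_equiv track=rewrite | github.com/aliencaocao/huawei-spark | ocr/ocr-extractor.py | computer_extractor
-- ===== SOURCE A (Python) =====
-- def computer_extractor(word_list, word_list_lowered, category_attributes):
--     filled_attributes = {}
--     for k, v in category_attributes.items():
--         for i in range(len(word_list) - 1):  # stop finding at 2nd last word
--             if word_list_lowered[i] in v:
--                 filled_attributes[k] = word_list[i + 1]
--                 break
--     return filled_attributes
-- ===== SOURCE B (Python) =====
-- def computer_extractor(word_list, word_list_lowered, category_attributes):
--     # index each lowered word (positions 0..len-2) to its earliest position, once
--     first_idx = {}
--     for i in range(len(word_list) - 1):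
--         w = word_list_lowered[i]
--         if w not in first_idx:
--             first_idx[w] = i
--     filled_attributes = {}
--     for k, v in category_attributes.items():
--         idxs = [first_idx[w] for w in v if w in first_idx]
--         if idxs:
--             filled_attributes[k] = word_list[min(idxs) + 1]
--     return filled_attributes
-- ===== Notes on version B (the rewrite author's own statement) =====
-- stated objective: faster
-- what changed: B builds a first-occurrence index of the lowered words in one pass and answers each category by the minimum indexed position of its words, instead of A's full rescan of word_list per category.
-- outside the precondition, e.g. on computer_extractor(['a', 'b', 'c'], ['a'], {'k': ['a']}): A returns {'k': 'b'}, B raises IndexError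
import Mathlib
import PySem

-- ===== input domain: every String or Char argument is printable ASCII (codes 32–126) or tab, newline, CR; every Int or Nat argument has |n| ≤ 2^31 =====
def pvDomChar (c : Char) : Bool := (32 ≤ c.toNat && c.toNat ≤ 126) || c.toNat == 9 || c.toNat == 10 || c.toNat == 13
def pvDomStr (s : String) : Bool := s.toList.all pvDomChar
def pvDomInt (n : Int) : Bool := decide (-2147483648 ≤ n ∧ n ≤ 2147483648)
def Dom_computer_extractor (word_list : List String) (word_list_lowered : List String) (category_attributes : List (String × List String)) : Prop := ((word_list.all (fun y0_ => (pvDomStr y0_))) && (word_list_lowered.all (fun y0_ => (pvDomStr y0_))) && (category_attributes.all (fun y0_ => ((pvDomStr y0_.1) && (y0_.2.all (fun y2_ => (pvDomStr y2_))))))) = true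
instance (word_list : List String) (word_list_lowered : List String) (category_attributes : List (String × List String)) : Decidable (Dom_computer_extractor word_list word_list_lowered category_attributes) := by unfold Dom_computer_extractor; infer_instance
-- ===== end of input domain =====

-- B replaces A's per-category rescan of word_list by a single first-occurrence index of the
-- lowered words plus a minimum over each category's indexed positions (objective: faster).
-- ===== PORT A =====
-- inner 'for i in range(len(word_list) - 1): ... break' loop of A
def pvALoop (word_list : List String) (word_list_lowered : List String) (v : List String)
    (k : String) (d : PySem.Dict String String) (i : Nat) : PySem.Dict String String :=
  if i < word_list.length - 1 then
    match PySem.List.pyGet? word_list_lowered (i : Int) with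
    | none => d  -- Python raises IndexError here (excluded by Pre_)
    | some w =>
      if v.contains w then
        d.insert k (PySem.List.pyGetD word_list ((i : Int) + 1) "")
      else pvALoop word_list word_list_lowered v k d (i + 1)
  else d
termination_by word_list.length - 1 - i

def computer_extractor (word_list : List String) (word_list_lowered : List String) (category_attributes : List (String × List String)) : List (String × String) :=
  (category_attributes.foldl
    (fun d kv => pvALoop word_list word_list_lowered kv.2 kv.1 d 0)
    PySem.Dict.empty).items

-- ===== PORT B =====
-- one indexing pass: earliest position of each lowered word among positions 0 .. len-2
def pvFirstIdx (word_list : List String) (word_list_lowered : List String) : PySem.Dict String Nat :=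
  (List.range (word_list.length - 1)).foldl
    (fun d (i : Nat) =>
      match PySem.List.pyGet? word_list_lowered (i : Int) with
      | none => d  -- Python raises IndexError here (excluded by Pre_)
      | some w => if d.contains w then d else d.insert w i)
    PySem.Dict.empty

def computer_extractor_alt (word_list : List String) (word_list_lowered : List String) (category_attributes : List (String × List String)) : List (String × String) :=
  let firstIdx := pvFirstIdx word_list word_list_lowered
  (category_attributes.foldl
    (fun (d : PySem.Dict String String) kv =>
      let idxs := kv.2.filterMap (fun w => firstIdx.get? w)
      match PySem.List.min? idxs (fun x => x) with
      | none => d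
      | some m => d.insert kv.1 (PySem.List.pyGetD word_list (((m : Nat) : Int) + 1) ""))
    PySem.Dict.empty).items

-- ===== PRECONDITION & SPEC =====
-- Pre_ excludes inputs whose lowered list is shorter than len(word_list) - 1: there A's inner scan
-- can run past the end of word_list_lowered and raise IndexError (B's indexing pass always does).
def Pre_computer_extractor (word_list : List String) (word_list_lowered : List String) (category_attributes : List (String × List String)) : Prop :=
  word_list.length ≤ word_list_lowered.length + 1
instance (word_list : List String) (word_list_lowered : List String) (category_attributes : List (String × List String)) : Decidable (Pre_computer_extractor word_list word_list_lowered category_attributes) := by unfold Pre_computer_extractor; infer_instance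

def pvWitness_computer_extractor : List String × List String × (List (String × List String)) :=
  (["Go", "Fast", "Now"], ["go", "fast", "now"], [("speed", ["go", "fast"]), ("other", ["zz"])])

def Spec_computer_extractor (word_list : List String) (word_list_lowered : List String) (category_attributes : List (String × List String)) (out : List (String × String)) : Prop := out = computer_extractor_alt word_list word_list_lowered category_attributes
instance (word_list : List String) (word_list_lowered : List String) (category_attributes : List (String × List String)) (out : List (String × String)) : Decidable (Spec_computer_extractor word_list word_list_lowered category_attributes out) := by unfold Spec_computer_extractor; infer_instance

-- ===== CLAIM (what is proved, stated in full; the proofs are below) =====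
def Claim_equal_computer_extractor : Prop := ∀ (word_list : List String) (word_list_lowered : List String) (category_attributes : List (String × List String)), Dom_computer_extractor word_list word_list_lowered category_attributes → Pre_computer_extractor word_list word_list_lowered category_attributes → Spec_computer_extractor word_list word_list_lowered category_attributes (computer_extractor word_list word_list_lowered category_attributes)

-- ===== LEMMAS AND PROOFS =====

-- first index i in [start, n) with p (wll.getD i ""): the common characterisation of
-- A's break-scan and of B's minimum over first occurrences
def pvFF (wll : List String) (p : String → Bool) (n : Nat) (i : Nat) : Option Nat :=
  if i < n then (if p (wll.getD i "") then some i else pvFF wll p n (i + 1)) else none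
termination_by n - i


theorem pvFF_eq_none_iff (wll : List String) (p : String → Bool) (n i : Nat) :
    pvFF wll p n i = none ↔ ∀ m, i ≤ m → m < n → p (wll.getD m "") = false := by
  fun_induction pvFF with
  | case1 i hlt hp =>
    constructor
    · intro h; cases h
    · intro h; have hf := h i le_rfl hlt; rw [hp] at hf; cases hf
  | case2 i hlt hp ih =>
    rw [ih]
    constructor
    · intro h m him hm
      rcases Nat.eq_or_lt_of_le him with rfl | h2
      · exact Bool.eq_false_iff.mpr hp
      · exact h m (by omega) hm
    · intro h m him hm
      exact h m (by omega) hm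
  | case3 i hlt =>
    constructor
    · intro _ m h1 h2; exact absurd h2 (by omega)
    · intro _; rfl

theorem pvFF_eq_some_iff (wll : List String) (p : String → Bool) (n i j : Nat) :
    pvFF wll p n i = some j ↔
      i ≤ j ∧ j < n ∧ p (wll.getD j "") = true ∧ ∀ m, i ≤ m → m < j → p (wll.getD m "") = false := by
  fun_induction pvFF generalizing j with
  | case1 i hlt hp =>
    constructor
    · intro h
      injection h with h; subst h
      exact ⟨le_rfl, hlt, hp, fun m h1 h2 => absurd h2 (by omega)⟩
    · rintro ⟨h1, h2, h3, h4⟩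
      have hij : i = j := by
        by_contra hne
        have hlt2 : i < j := by omega
        have hf := h4 i le_rfl hlt2
        rw [hp] at hf; cases hf
      rw [hij]
  | case2 i hlt hp ih =>
    rw [ih]
    constructor
    · rintro ⟨h1, h2, h3, h4⟩
      refine ⟨by omega, h2, h3, fun m hm1 hm2 => ?_⟩
      rcases Nat.eq_or_lt_of_le hm1 with rfl | hlt3
      · exact Bool.eq_false_iff.mpr hp
      · exact h4 m (by omega) hm2
    · rintro ⟨h1, h2, h3, h4⟩
      have hij : i ≠ j := by rintro rfl; exact hp h3
      exact ⟨by omega, h2, h3, fun m hm1 hm2 => h4 m (by omega) hm2⟩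
  | case3 i hlt =>
    constructor
    · intro h; cases h
    · rintro ⟨h1, h2, _, _⟩; exact absurd h2 (by omega)

theorem pvALoop_eq (word_list word_list_lowered v : List String) (k : String)
    (d : PySem.Dict String String) (i : Nat)
    (h : word_list.length - 1 ≤ word_list_lowered.length) :
    pvALoop word_list word_list_lowered v k d i =
      match pvFF word_list_lowered (fun x => v.contains x) (word_list.length - 1) i with
      | none => d
      | some j => d.insert k (word_list.getD (j + 1) "") := by
  fun_induction pvALoop with
  | case1 i hlt heq =>
    have := PySem.List.pyGet?_ofNat word_list_lowered i (by omega)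
    rw [this] at heq; cases heq
  | case2 i hlt w heq hc =>
    have hg := PySem.List.pyGet?_ofNat word_list_lowered i (by omega)
    rw [hg] at heq; injection heq with heq
    rw [pvFF]
    have hgd : word_list_lowered.getD i "" = w := by
      rw [List.getD_eq_getElem word_list_lowered "" (by omega), heq]
    rw [if_pos hlt, hgd, if_pos hc]
    have : ((i : Int) + 1) = ((i + 1 : Nat) : Int) := by push_cast; ring
    rw [this, PySem.List.pyGetD_natCast]
  | case3 i hlt w heq hc ih =>
    have hg := PySem.List.pyGet?_ofNat word_list_lowered i (by omega)
    rw [hg] at heq; injection heq with heq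
    have hgd : word_list_lowered.getD i "" = w := by
      rw [List.getD_eq_getElem word_list_lowered "" (by omega), heq]
    rw [pvFF, if_pos hlt, hgd, if_neg (by simpa using hc)]
    exact ih
  | case4 i hlt =>
    rw [pvFF, if_neg hlt]

theorem pvFF_succ (wll : List String) (p : String → Bool) (n : Nat) :
    pvFF wll p (n + 1) 0 =
      match pvFF wll p n 0 with
      | some j => some j
      | none => if p (wll.getD n "") then some n else none := by
  cases hf : pvFF wll p n 0 with
  | some j =>
    obtain ⟨h1, h2, h3, h4⟩ := (pvFF_eq_some_iff wll p n 0 j).mp hf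
    exact (pvFF_eq_some_iff wll p (n + 1) 0 j).mpr ⟨h1, by omega, h3, h4⟩
  | none =>
    have hall := (pvFF_eq_none_iff wll p n 0).mp hf
    by_cases hp : p (wll.getD n "") = true
    · rw [if_pos hp]
      exact (pvFF_eq_some_iff wll p (n + 1) 0 n).mpr
        ⟨Nat.zero_le n, by omega, hp, fun m hm1 hm2 => hall m hm1 hm2⟩
    · rw [if_neg hp]
      refine (pvFF_eq_none_iff wll p (n + 1) 0).mpr (fun m hm1 hm2 => ?_)
      rcases Nat.lt_succ_iff_lt_or_eq.mp hm2 with hlt | rfl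
      · exact hall m hm1 hlt
      · exact Bool.eq_false_iff.mpr hp

theorem pvBuild_get? (wll : List String) (n : Nat) (h : n ≤ wll.length) (w : String) :
    ((List.range n).foldl
      (fun d (i : Nat) =>
        match PySem.List.pyGet? wll (i : Int) with
        | none => d
        | some x => if d.contains x then d else d.insert x i)
      PySem.Dict.empty).get? w = pvFF wll (fun x => x == w) n 0 := by
  revert h
  induction n generalizing w with
  | zero =>
    intro h
    rw [pvFF]
    simp [PySem.Dict.get?_empty]
  | succ n ih =>
    intro h
    have hn : n ≤ wll.length := by omega
    rw [List.range_succ, List.foldl_append, List.foldl_cons, List.foldl_nil]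
    rw [PySem.List.pyGet?_ofNat wll n (by omega)]
    have hgd : wll.getD n "" = wll[n] := List.getD_eq_getElem wll "" (by omega)
    set dn := (List.range n).foldl
      (fun d (i : Nat) =>
        match PySem.List.pyGet? wll (i : Int) with
        | none => d
        | some x => if d.contains x then d else d.insert x i)
      PySem.Dict.empty with hdn
    rw [pvFF_succ]
    show (if dn.contains wll[n] = true then dn else dn.insert wll[n] n).get? w = _
    by_cases hc : dn.contains wll[n] = true
    · rw [if_pos hc, ih w hn]
      cases hf : pvFF wll (fun x => x == w) n 0 with
      | some j => rfl
      | none =>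
        have hne : (wll[n] == w) = false := by
          by_contra hb
          have hb' : wll[n] = w := by
            cases hx : (wll[n] == w) with
            | false => exact absurd hx hb
            | true => exact eq_of_beq hx
          have hgetn := ih wll[n] hn
          rw [hb', hf] at hgetn
          rw [PySem.Dict.contains_eq_isSome_get?, hb', hgetn] at hc
          simp at hc
        rw [hgd, hne]
        rfl
    · rw [if_neg hc]
      have hnone : pvFF wll (fun x => x == wll[n]) n 0 = none := by
        rw [PySem.Dict.contains_eq_isSome_get?] at hc
        exact (ih wll[n] hn).symm.trans (Option.not_isSome_iff_eq_none.mp hc)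
      rw [PySem.Dict.get?_insert]
      by_cases hw : w = wll[n]
      · rw [if_pos hw, hw, hnone, hgd]
        simp
      · rw [if_neg hw, ih w hn]
        cases hf : pvFF wll (fun x => x == w) n 0 with
        | some j => rfl
        | none =>
          have hne : (wll[n] == w) = false := by
            cases hx : (wll[n] == w) with
            | false => rfl
            | true => exact absurd (eq_of_beq hx).symm hw
          rw [hgd, hne]
          rfl

theorem pvMin_filterMap (wll v : List String) (n : Nat) :
    PySem.List.min? (v.filterMap (fun w => pvFF wll (fun x => x == w) n 0)) (fun x => x) =
      pvFF wll (fun x => v.contains x) n 0 := by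
  cases hr : pvFF wll (fun x => v.contains x) n 0 with
  | none =>
    have hall := (pvFF_eq_none_iff wll (fun x => v.contains x) n 0).mp hr
    have hnil : v.filterMap (fun w => pvFF wll (fun x => x == w) n 0) = [] := by
      rw [List.filterMap_eq_nil_iff]
      intro w hw
      cases hfw : pvFF wll (fun x => x == w) n 0 with
      | none => rfl
      | some j =>
        exfalso
        obtain ⟨_, h2, h3, _⟩ := (pvFF_eq_some_iff wll (fun x => x == w) n 0 j).mp hfw
        have hcw : v.contains (wll.getD j "") = false := hall j (Nat.zero_le j) h2
        rw [eq_of_beq h3] at hcw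
        have := List.contains_iff_mem.mpr hw
        exact Bool.false_ne_true (hcw.symm.trans this)
    rw [hnil]
    exact (PySem.List.min?_eq_none_iff _ _).mpr rfl
  | some j =>
    obtain ⟨_, hjn, hpj, hmin⟩ := (pvFF_eq_some_iff wll (fun x => v.contains x) n 0 j).mp hr
    have hw0v : wll.getD j "" ∈ v := List.contains_iff_mem.mp hpj
    have hffw0 : pvFF wll (fun x => x == wll.getD j "") n 0 = some j := by
      refine (pvFF_eq_some_iff wll (fun x => x == wll.getD j "") n 0 j).mpr
        ⟨Nat.zero_le j, hjn, by simp, fun m hm1 hm2 => ?_⟩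
      cases hx : (wll.getD m "" == wll.getD j "") with
      | false => rfl
      | true =>
        exfalso
        have hc := hmin m hm1 hm2
        rw [eq_of_beq hx] at hc
        exact Bool.false_ne_true (hc.symm.trans hpj)
    have hjmem : j ∈ v.filterMap (fun w => pvFF wll (fun x => x == w) n 0) :=
      List.mem_filterMap.mpr ⟨wll.getD j "", hw0v, hffw0⟩
    have hlb : ∀ x ∈ v.filterMap (fun w => pvFF wll (fun x => x == w) n 0), j ≤ x := by
      intro x hx
      obtain ⟨w, hwv, hfw⟩ := List.mem_filterMap.mp hx
      obtain ⟨_, hxn, hx3, _⟩ := (pvFF_eq_some_iff wll (fun y => y == w) n 0 x).mp hfw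
      by_contra hlt
      have hc := hmin x (Nat.zero_le x) (by omega)
      have : v.contains (wll.getD x "") = true := by
        rw [eq_of_beq hx3]
        exact List.contains_iff_mem.mpr hwv
      exact Bool.false_ne_true (hc.symm.trans this)
    cases hm : PySem.List.min? (v.filterMap (fun w => pvFF wll (fun x => x == w) n 0)) (fun x => x) with
    | none =>
      exfalso
      rw [(PySem.List.min?_eq_none_iff _ _).mp hm] at hjmem
      cases hjmem
    | some m =>
      have hmem := PySem.List.min?_mem hm
      have h1 := hlb m hmem
      have h2 := PySem.List.min?_isMin hm j hjmem
      rw [le_antisymm h2 h1]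

theorem computer_extractor_spec_aux (word_list word_list_lowered : List String)
    (category_attributes : List (String × List String))
    (h : word_list.length ≤ word_list_lowered.length + 1) :
    computer_extractor word_list word_list_lowered category_attributes =
      computer_extractor_alt word_list word_list_lowered category_attributes := by
  have hn : word_list.length - 1 ≤ word_list_lowered.length := by omega
  unfold computer_extractor computer_extractor_alt
  congr 1
  apply List.foldl_ext
  intro d kv _
  simp only []
  rw [pvALoop_eq word_list word_list_lowered kv.2 kv.1 d 0 hn]
  have hfi : (fun w => (pvFirstIdx word_list word_list_lowered).get? w) =
      (fun w => pvFF word_list_lowered (fun x => x == w) (word_list.length - 1) 0) := by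
    funext w
    exact pvBuild_get? word_list_lowered (word_list.length - 1) hn w
  rw [hfi, pvMin_filterMap word_list_lowered kv.2 (word_list.length - 1)]
  cases pvFF word_list_lowered (fun x => kv.2.contains x) (word_list.length - 1) 0 with
  | none => rfl
  | some j =>
    show d.insert kv.1 (word_list.getD (j + 1) "") =
      d.insert kv.1 (PySem.List.pyGetD word_list ((j : Int) + 1) "")
    rw [show ((j : Int) + 1) = ((j + 1 : Nat) : Int) by push_cast; ring,
      PySem.List.pyGetD_natCast]

-- ===== VERDICT (by name: the statement is the Claim_ definition above) =====
theorem computer_extractor_spec : Claim_equal_computer_extractor := by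
  intro word_list word_list_lowered category_attributes _ hpre
  exact computer_extractor_spec_aux word_list word_list_lowered category_attributes hpre
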